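-- pv_equiv track=rewrite | github.com/ITlearning/webrtc-ios-issue-symbol-finder | scripts/find_webrtc_issue_scope.py | parse_csv_args
-- ===== SOURCE A (Python) =====
-- def parse_csv_args(raw_values: list[str]) -> list[str]:
--     result: list[str] = []
--     for raw in raw_values:
--         for part in raw.split(","):
--             value = part.strip()
--             if value:
--                 result.append(value)
--     return result
-- ===== SOURCE B (Python) =====
-- def parse_csv_args(raw_values: list[str]) -> list[str]:
--     # Character-level state machine: build each token directly; 'pend' holds
--     # whitespace seen inside a token (flushed only if more non-space follows),
--     # so leading/trailing whitespace never enters a token and no split/strip is used.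
--     result: list[str] = []
--     for raw in raw_values:
--         buf: list[str] = []
--         pend: list[str] = []
--         for ch in raw:
--             if ch == ",":
--                 if buf:
--                     result.append("".join(buf))
--                 buf = []
--                 pend = []
--             elif ch.isspace():
--                 if buf:
--                     pend.append(ch)
--             else:
--                 buf.extend(pend)
--                 pend = []
--                 buf.append(ch)
--         if buf:
--             result.append("".join(buf))
--     return result
-- ===== Notes on version B (the rewrite author's own statement) =====
-- stated objective: alternative
-- what changed: Replaces split(',') plus strip() per part by a single character-level state machine that builds each token directly (token buffer plus pending-whitespace buffer, flushed on comma or end of string), using no split/strip/join calls.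
import Mathlib
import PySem

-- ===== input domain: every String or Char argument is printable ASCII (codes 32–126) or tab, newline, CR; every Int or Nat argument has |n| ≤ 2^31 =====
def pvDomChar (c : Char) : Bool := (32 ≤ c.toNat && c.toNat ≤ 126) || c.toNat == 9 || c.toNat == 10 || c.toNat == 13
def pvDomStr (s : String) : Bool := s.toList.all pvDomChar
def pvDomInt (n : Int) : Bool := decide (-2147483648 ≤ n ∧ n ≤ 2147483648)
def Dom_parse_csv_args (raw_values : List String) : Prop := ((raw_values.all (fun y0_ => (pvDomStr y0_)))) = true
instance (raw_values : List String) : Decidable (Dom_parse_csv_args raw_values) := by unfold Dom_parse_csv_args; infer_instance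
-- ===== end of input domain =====

-- B replaces split(",")+strip() per part by a single character-level state machine that
-- builds each token directly (objective: alternative — same cost, no split/strip calls).

-- ===== PORT A =====
-- nested loops: for raw in raw_values: for part in raw.split(","): strip, append if nonempty
def parse_csv_args (raw_values : List String) : List String :=
  raw_values.foldl (fun result raw =>
    (PySem.Chars.splitOn raw.toList [',']).foldl (fun result part =>
      let value := PySem.Chars.strip part
      if value ≠ [] then result ++ [String.ofList value] else result) result) []

-- ===== PORT B =====
-- one step of the character state machine: state = (result, buf, pend);
-- ',' flushes buf, whitespace is pended (only inside a token), other chars flush pend into buf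
def pcaStep (st : List String × List Char × List Char) (ch : Char) :
    List String × List Char × List Char :=
  if ch = ',' then
    (if st.2.1 ≠ [] then st.1 ++ [String.ofList st.2.1] else st.1, [], [])
  else if PySem.Chars.isspace ch then
    (st.1, st.2.1, if st.2.1 ≠ [] then st.2.2 ++ [ch] else st.2.2)
  else
    (st.1, st.2.1 ++ st.2.2 ++ [ch], [])

-- the end-of-string flush ('if buf: result.append(...)')
def pcaFlush (st : List String × List Char × List Char) : List String :=
  if st.2.1 ≠ [] then st.1 ++ [String.ofList st.2.1] else st.1

def parse_csv_args_alt (raw_values : List String) : List String :=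
  raw_values.foldl (fun result raw =>
    pcaFlush (raw.toList.foldl pcaStep (result, [], []))) []

-- ===== PRECONDITION & SPEC =====
def Spec_parse_csv_args (raw_values : List String) (out : List String) : Prop := out = parse_csv_args_alt raw_values
instance (raw_values : List String) (out : List String) : Decidable (Spec_parse_csv_args raw_values out) := by unfold Spec_parse_csv_args; infer_instance

-- ===== CLAIM (what is proved, stated in full; the proofs are below) =====
def Claim_equal_parse_csv_args : Prop := ∀ (raw_values : List String), Dom_parse_csv_args raw_values → Spec_parse_csv_args raw_values (parse_csv_args raw_values)

-- ===== LEMMAS AND PROOFS =====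

-- a plain structural model of splitting on a single comma
def mySplit : List Char → List (List Char)
  | [] => [[]]
  | c :: rest =>
    if c = ',' then [] :: mySplit rest
    else match mySplit rest with
      | [] => [[c]]
      | x :: xs => (c :: x) :: xs

theorem mySplit_ne_nil (l : List Char) : mySplit l ≠ [] := by
  cases l with
  | nil => simp [mySplit]
  | cons c rest =>
    simp only [mySplit]
    split_ifs
    · simp
    · split <;> simp

theorem go_spec (l : List Char) : ∀ (fuel : Nat) (acc : List (List Char)) (curp : List Char),
    l.length < fuel →
    PySem.Chars.splitOn.go [','] fuel l curp acc =
      acc.reverse ++ (match mySplit l with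
        | [] => [curp.reverse]
        | x :: xs => (curp.reverse ++ x) :: xs) := by
  induction l with
  | nil =>
    intro fuel acc curp h
    match fuel with
    | f + 1 => simp [PySem.Chars.splitOn.go, mySplit]
  | cons c rest ih =>
    intro fuel acc curp h
    match fuel with
    | f + 1 =>
      by_cases hc : c = ','
      · subst hc
        have hpre : List.isPrefixOf [','] (',' :: rest) = true := by
          simp [List.isPrefixOf]
        simp only [PySem.Chars.splitOn.go, hpre, if_true, List.length_cons, List.drop_succ_cons,
          List.length_nil, List.drop_zero]
        rw [ih f (curp.reverse :: acc) [] (by simpa using Nat.lt_of_succ_lt_succ h)]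
        simp only [mySplit, if_true]
        cases hms : mySplit rest with
        | nil => exact absurd hms (mySplit_ne_nil rest)
        | cons x xs => simp
      · have hpre : List.isPrefixOf [','] (c :: rest) = false := by
          simp [List.isPrefixOf, BEq.beq]
          intro h'; exact absurd h'.symm hc
        simp only [PySem.Chars.splitOn.go, hpre, Bool.false_eq_true, if_false]
        rw [ih f acc (c :: curp) (by simpa using Nat.lt_of_succ_lt_succ h)]
        simp only [mySplit, hc, if_false]
        cases hms : mySplit rest with
        | nil => exact absurd hms (mySplit_ne_nil rest)
        | cons x xs => simp

theorem splitOn_comma (l : List Char) : PySem.Chars.splitOn l [','] = mySplit l := by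
  unfold PySem.Chars.splitOn
  rw [go_spec l (l.length + 1) [] [] (Nat.lt_succ_self _)]
  cases hms : mySplit l with
  | nil => exact absurd hms (mySplit_ne_nil l)
  | cons x xs => simp

-- the value-filter A applies to each part
def pvFilt (p : List Char) : Option String :=
  let v := PySem.Chars.strip p
  if v = [] then none else some (String.ofList v)

theorem inner_foldl (parts : List (List Char)) (res : List String) :
    parts.foldl (fun result part =>
      let value := PySem.Chars.strip part
      if value ≠ [] then result ++ [String.ofList value] else result) res
    = res ++ parts.filterMap pvFilt := by
  induction parts generalizing res with
  | nil => simp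
  | cons p rest ih =>
    simp only [List.foldl_cons, List.filterMap_cons, ih, pvFilt]
    by_cases hv : PySem.Chars.strip p = [] <;> simp [hv]

theorem outer_foldl (rvs : List String) (res : List String) :
    rvs.foldl (fun result raw =>
      (PySem.Chars.splitOn raw.toList [',']).foldl (fun result part =>
        let value := PySem.Chars.strip part
        if value ≠ [] then result ++ [String.ofList value] else result) result) res
    = res ++ (rvs.flatMap (fun raw => mySplit raw.toList)).filterMap pvFilt := by
  induction rvs generalizing res with
  | nil => simp
  | cons r rest ih =>
    rw [List.foldl_cons, inner_foldl, ih]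
    simp [List.flatMap_cons, List.filterMap_append, splitOn_comma]

-- ---- whitespace/strip facts ----

theorem rstrip_eq_nil_of_all (p : List Char) (h : p.all PySem.Chars.isspace = true) :
    PySem.Chars.rstrip p = [] := by
  unfold PySem.Chars.rstrip
  rw [List.dropWhile_eq_nil_iff.2 (by intro x hx; exact (List.all_eq_true.1 h) x (List.mem_reverse.1 hx))]
  rfl

theorem strip_eq_nil_iff (p : List Char) :
    PySem.Chars.strip p = [] ↔ p.all PySem.Chars.isspace = true := by
  constructor
  · intro h
    unfold PySem.Chars.strip PySem.Chars.rstrip PySem.Chars.lstrip at h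
    rw [List.reverse_eq_nil_iff, List.dropWhile_eq_nil_iff] at h
    rw [List.all_eq_true]
    intro x hx
    rcases List.takeWhile_append_dropWhile (p := PySem.Chars.isspace) (l := p) ▸ hx with _
    have : x ∈ p.takeWhile PySem.Chars.isspace ++ p.dropWhile PySem.Chars.isspace := by
      rw [List.takeWhile_append_dropWhile]; exact hx
    rcases List.mem_append.1 this with h1 | h1
    · exact List.mem_takeWhile_imp h1
    · exact h x (List.mem_reverse.2 h1)
  · intro h
    unfold PySem.Chars.strip PySem.Chars.lstrip
    apply rstrip_eq_nil_of_all
    rw [List.all_eq_true] at h ⊢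
    intro x hx
    exact h x ((List.dropWhile_sublist _).subset hx)

theorem strip_cons_ws (c : Char) (p : List Char) (h : PySem.Chars.isspace c = true) :
    PySem.Chars.strip (c :: p) = PySem.Chars.strip p := by
  unfold PySem.Chars.strip PySem.Chars.lstrip
  rw [List.dropWhile_cons_of_pos h]

theorem rstrip_cons (c : Char) (p : List Char)
    (h : PySem.Chars.isspace c = false ∨ p.all PySem.Chars.isspace = false) :
    PySem.Chars.rstrip (c :: p) = c :: PySem.Chars.rstrip p := by
  unfold PySem.Chars.rstrip
  rw [List.reverse_cons, List.dropWhile_append]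
  by_cases hall : p.all PySem.Chars.isspace = true
  · have hc : PySem.Chars.isspace c = false := by
      rcases h with h | h
      · exact h
      · exact absurd hall (by simp [h])
    have : List.dropWhile PySem.Chars.isspace p.reverse = [] :=
      List.dropWhile_eq_nil_iff.2 (by intro x hx; exact (List.all_eq_true.1 hall) x (List.mem_reverse.1 hx))
    simp [this, List.dropWhile_cons_of_neg, hc]
  · have hne : List.dropWhile PySem.Chars.isspace p.reverse ≠ [] := by
      intro hnil
      apply hall
      rw [List.all_eq_true]
      intro x hx
      exact (List.dropWhile_eq_nil_iff.1 hnil) x (List.mem_reverse.2 hx)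
    simp [List.isEmpty_iff, hne]

theorem strip_cons_nonws (c : Char) (p : List Char) (h : PySem.Chars.isspace c = false) :
    PySem.Chars.strip (c :: p) = c :: PySem.Chars.rstrip p := by
  unfold PySem.Chars.strip PySem.Chars.lstrip
  rw [List.dropWhile_cons_of_neg (by simp [h])]
  exact rstrip_cons c p (Or.inl h)

-- ---- B's state machine vs mySplit ----

-- what buf becomes after scanning a comma-free part p from state (buf, pend)
def pcaF (buf pend p : List Char) : List Char :=
  if p.all PySem.Chars.isspace then buf
  else buf ++ pend ++ (if buf = [] then PySem.Chars.strip p else PySem.Chars.rstrip p)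

-- emit a finished buffer
def emitL (b : List Char) : List String := if b = [] then [] else [String.ofList b]

theorem pcaF_nil (buf pend : List Char) : pcaF buf pend [] = buf := by
  simp [pcaF]

theorem pcaF_start (h : List Char) :
    emitL (pcaF [] [] h) = (pvFilt h).toList.map id := by
  unfold pcaF emitL
  by_cases hall : h.all PySem.Chars.isspace = true
  · simp [hall, pvFilt, (strip_eq_nil_iff h).2 hall]
  · have hs : PySem.Chars.strip h ≠ [] := fun hx => hall ((strip_eq_nil_iff h).1 hx)
    simp [hall, pvFilt, hs]

theorem pcaF_ws (c : Char) (buf pend h : List Char) (hw : PySem.Chars.isspace c = true) :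
    pcaF buf pend (c :: h) = pcaF buf (if buf ≠ [] then pend ++ [c] else pend) h := by
  unfold pcaF
  have hall_eq : (c :: h).all PySem.Chars.isspace = h.all PySem.Chars.isspace := by
    simp [List.all_cons, hw]
  rw [hall_eq]
  by_cases hall : h.all PySem.Chars.isspace = true
  · rw [if_pos hall, if_pos hall]
  · have hall' : h.all PySem.Chars.isspace = false := by simpa using hall
    rw [if_neg hall, if_neg hall]
    by_cases hb : buf = []
    · subst hb
      rw [strip_cons_ws c h hw]
      simp
    · rw [if_neg hb, if_neg hb, rstrip_cons c h (Or.inr hall'), if_pos hb]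
      simp

theorem pcaF_nonws (c : Char) (buf pend h : List Char)
    (hw : PySem.Chars.isspace c = false) :
    pcaF buf pend (c :: h) = pcaF (buf ++ pend ++ [c]) [] h := by
  unfold pcaF
  have hall_eq : (c :: h).all PySem.Chars.isspace = false := by
    simp [List.all_cons, hw]
  rw [hall_eq]
  simp only [Bool.false_eq_true, if_false]
  by_cases hall : h.all PySem.Chars.isspace = true
  · have h3 := rstrip_eq_nil_of_all h hall
    by_cases hb : buf = [] <;>
      simp [hall, hb, strip_cons_nonws c h hw, rstrip_cons c h (Or.inl hw), h3]
  · have hall' : h.all PySem.Chars.isspace = false := by simpa using hall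
    by_cases hb : buf = [] <;>
      simp [hall', hb, strip_cons_nonws c h hw, rstrip_cons c h (Or.inl hw)]

theorem scan_spec (l : List Char) : ∀ (res : List String) (buf pend : List Char),
    pcaFlush (l.foldl pcaStep (res, buf, pend)) =
      res ++ emitL (pcaF buf pend (mySplit l).headI) ++ ((mySplit l).tail.filterMap pvFilt) := by
  induction l with
  | nil =>
    intro res buf pend
    simp only [List.foldl_nil, mySplit, List.headI, List.tail, List.filterMap_nil,
      List.append_nil, pcaF_nil]
    unfold pcaFlush emitL
    by_cases hb : buf = [] <;> simp [hb]
  | cons c rest ih =>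
    intro res buf pend
    obtain ⟨h, t, hmr⟩ : ∃ h t, mySplit rest = h :: t := by
      cases hx : mySplit rest with
      | nil => exact absurd hx (mySplit_ne_nil rest)
      | cons h t => exact ⟨h, t, rfl⟩
    by_cases hc : c = ','
    · subst hc
      have hstep : pcaStep (res, buf, pend) ',' =
          (if buf ≠ [] then res ++ [String.ofList buf] else res, [], []) := by
        simp [pcaStep]
      have hms : mySplit (',' :: rest) = [] :: h :: t := by simp [mySplit, hmr]
      rw [List.foldl_cons, hstep, ih, hmr, hms]
      simp only [List.headI, List.tail, List.filterMap_cons, pcaF_nil]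
      rw [pcaF_start]
      cases hf : pvFilt h with
      | none => by_cases hb : buf = [] <;> simp [hb, emitL]
      | some v => by_cases hb : buf = [] <;> simp [hb, emitL]
    · have hms : mySplit (c :: rest) = (c :: h) :: t := by
        simp [mySplit, hc, hmr]
      by_cases hw : PySem.Chars.isspace c = true
      · have hstep : pcaStep (res, buf, pend) c =
            (res, buf, if buf ≠ [] then pend ++ [c] else pend) := by
          simp [pcaStep, hc, hw]
        rw [List.foldl_cons, hstep, ih, hmr, hms]
        simp only [List.headI, List.tail]
        rw [pcaF_ws c buf pend h hw]
      · have hwf : PySem.Chars.isspace c = false := by simpa using hw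
        have hstep : pcaStep (res, buf, pend) c = (res, buf ++ pend ++ [c], []) := by
          simp [pcaStep, hc, hwf]
        rw [List.foldl_cons, hstep, ih, hmr, hms]
        simp only [List.headI, List.tail]
        rw [pcaF_nonws c buf pend h hwf]

theorem per_raw (raw : List Char) (res : List String) :
    pcaFlush (raw.foldl pcaStep (res, [], [])) = res ++ (mySplit raw).filterMap pvFilt := by
  rw [scan_spec]
  cases hmr : mySplit raw with
  | nil => exact absurd hmr (mySplit_ne_nil raw)
  | cons h t =>
    simp only [List.headI, List.tail, List.filterMap_cons]
    rw [pcaF_start]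
    cases hf : pvFilt h with
    | none => simp
    | some v => simp

theorem alt_foldl (rvs : List String) (res : List String) :
    rvs.foldl (fun result raw => pcaFlush (raw.toList.foldl pcaStep (result, [], []))) res
      = res ++ (rvs.flatMap (fun raw => mySplit raw.toList)).filterMap pvFilt := by
  induction rvs generalizing res with
  | nil => simp
  | cons r rest ih =>
    rw [List.foldl_cons, per_raw, ih]
    simp [List.flatMap_cons, List.filterMap_append]

-- ===== VERDICT (by name: the statement is the Claim_ definition above) =====
theorem parse_csv_args_spec : Claim_equal_parse_csv_args := by
  intro raw_values _
  unfold Spec_parse_csv_args parse_csv_args parse_csv_args_alt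
  rw [outer_foldl, alt_foldl]
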